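-- pv_equiv track=rewrite | github.com/rjovelin/Rosalind | Textbook_track/3E/greedy_motif_pseudocounts.py | motif_score
-- ===== SOURCE A (Python) =====
-- def motif_score(sequences):
--     '''
--     (dict) -> int
--     Return the score of a collection of sequences called Motif
--     The score is defined as the sum of the number of unpopular nucleotides
--     at each position of the sequences
--     Precondition: all the sequences in the collection have same length
--     '''
--     # initialize score
--     score = 0
--
--     # make a list of keys in dict
--     seqnames = [i for i in sequences.keys()]
--
--     # go over each nucleotide of each sequence, count the number of unpopular nucleotides and sum to get the score
--     for i in range(len(sequences[seqnames[0]])):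
--         # find the most popular nucleotide
--         # make a dict to store the nucleotides and count
--         nucleotides = {}
--         # populate the dict with the nucleotides in sequences at position i
--         for seq in sequences:
--             if sequences[seq][i] in nucleotides:
--                 nucleotides[sequences[seq][i]] += 1
--             else:
--                 nucleotides[sequences[seq][i]] = 1
--         # find the most popular nucleotide
--         popularity = [(count, base) for base, count in nucleotides.items()]
--         popularity.sort() # sort nucleotides by count
--         popular = popularity[-1][1]
--         # get the position score
--         position_score = 0
--         for base in popularity[:-1]:
--             position_score += base[0]
--         # add position score to the sequences score
--         score += position_score
--
--     return score
-- ===== SOURCE B (Python) =====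
-- def motif_score(sequences):
--     '''
--     (dict) -> int
--     Same score via a single flat counter: one pass over the sequences
--     (sequence-major, not column-major) counts every (position, nucleotide)
--     pair; a second pass over that counter fills a per-position maxima
--     array; the score is the closed form n*L - sum(maxima).
--     Precondition: all the sequences in the collection have same length
--     '''
--     seqs = list(sequences.values())
--     n = len(seqs)
--     L = len(seqs[0])
--     counts = {}
--     for s in seqs:
--         for i in range(L):
--             key = (i, s[i])
--             counts[key] = counts.get(key, 0) + 1
--     maxima = [0] * L
--     for (i, ch), c in counts.items():
--         if c > maxima[i]:
--             maxima[i] = c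
--     return n * L - sum(maxima)
-- ===== Notes on version B (the rewrite author's own statement) =====
-- stated objective: alternative
-- what changed: A loops column-major, building a fresh per-column nucleotide dict, sorting (count,base) tuples and summing all but the last; B makes one sequence-major pass filling a single flat counter keyed by (position,char), then one pass over that counter fills a per-position maxima array, and returns the closed form n*L - sum(maxima), with no per-column dict and no sort.
import Mathlib
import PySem

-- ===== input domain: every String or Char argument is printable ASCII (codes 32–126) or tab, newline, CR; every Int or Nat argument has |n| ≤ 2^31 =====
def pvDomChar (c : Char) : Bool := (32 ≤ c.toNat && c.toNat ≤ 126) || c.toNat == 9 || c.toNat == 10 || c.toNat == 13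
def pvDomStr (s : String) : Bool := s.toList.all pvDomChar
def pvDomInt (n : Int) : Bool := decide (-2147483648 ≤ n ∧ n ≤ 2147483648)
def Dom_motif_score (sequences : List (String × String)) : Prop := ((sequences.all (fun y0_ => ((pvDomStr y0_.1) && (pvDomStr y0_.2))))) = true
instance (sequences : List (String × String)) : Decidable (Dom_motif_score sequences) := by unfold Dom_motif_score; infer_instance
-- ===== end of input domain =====

-- B replaces A's column-major per-column dict + sort by one flat (position,char) counter built sequence-major, a maxima array, and the closed form n*L - sum(maxima) (alternative; no speed claim).


-- ===== PORT A =====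
def motif_score (sequences : List (String × String)) : Int :=
  let d : PySem.Dict String String := PySem.Dict.mk sequences
  let seqnames := d.keys
  match PySem.List.pyGet? seqnames 0 with            -- seqnames[0]: IndexError on empty dict
  | none => 0
  | some k0 =>
  match d.get? k0 with                               -- sequences[seqnames[0]]
  | none => 0
  | some s0 =>
  (PySem.List.pyRange 0 (PySem.Str.len s0) 1).foldl (fun score i =>
    let nucleotides : PySem.Dict Char Int := seqnames.foldl (fun nuc seq =>
      match d.get? seq with                          -- sequences[seq]
      | none => nuc
      | some sv =>
        match PySem.Str.pyGet? sv i with             -- sequences[seq][i]: IndexError if too short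
        | none => nuc
        | some c =>
          match nuc.get? c with                      -- 'in' test + read-and-increment
          | some cnt => nuc.insert c (cnt + 1)
          | none => nuc.insert c 1) PySem.Dict.empty
    let popularity := nucleotides.items.map (fun bc => (bc.2, bc.1))
    let pops := PySem.List.sorted2 popularity (fun p => p.1) (fun p => p.2)   -- popularity.sort()
    let position_score := (PySem.List.slice pops none (some (-1))).foldl (fun acc b => acc + b.1) 0
    score + position_score) 0

-- ===== PORT B =====
def motif_score_alt (sequences : List (String × String)) : Int :=
  let seqs := (PySem.Dict.mk sequences : PySem.Dict String String).values
  let n : Int := seqs.length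
  match PySem.List.pyGet? seqs 0 with                -- seqs[0]: IndexError on empty dict
  | none => 0
  | some s0 =>
  let L : Int := PySem.Str.len s0
  let counts : PySem.Dict (Int × Char) Int := seqs.foldl (fun d s =>
    (PySem.List.pyRange 0 L 1).foldl (fun d i =>
      match PySem.Str.pyGet? s i with                -- s[i]: IndexError if s is shorter
      | none => d
      | some ch => d.insert (i, ch) (d.getD (i, ch) 0 + 1)) d) PySem.Dict.empty
  let maxima : List Int := counts.items.foldl (fun m kv =>
    match PySem.List.pyGet? m kv.1.1 with            -- maxima[i]
    | none => m
    | some cur => if kv.2 > cur then PySem.List.pySetD m kv.1.1 kv.2 else m)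
    (List.replicate L.toNat 0)                       -- [0] * L
  n * L - maxima.sum

-- ===== PRECONDITION & SPEC =====
-- A raises IndexError on the empty dict and when some sequence is shorter than the first one;
-- keys must be Nodup because the argument is a Python dict (an association list with a duplicate
-- key does not denote any dict, so nothing Python-reachable is excluded by that conjunct).
def Pre_motif_score (sequences : List (String × String)) : Prop :=
  sequences ≠ [] ∧ (sequences.map Prod.fst).Nodup ∧
    ∀ p ∈ sequences, PySem.Str.len ((sequences.headI).2) ≤ PySem.Str.len p.2
instance (sequences : List (String × String)) : Decidable (Pre_motif_score sequences) := by
  unfold Pre_motif_score; infer_instance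
def pvWitness_motif_score : (List (String × String)) := [("a", "ACGT"), ("b", "ACGA"), ("c", "TCGA")]
def Spec_motif_score (sequences : List (String × String)) (out : Int) : Prop := out = motif_score_alt sequences
instance (sequences : List (String × String)) (out : Int) : Decidable (Spec_motif_score sequences out) := by unfold Spec_motif_score; infer_instance

-- ===== CLAIM (what is proved, stated in full; the proofs are below) =====
def Claim_equal_motif_score : Prop := ∀ (sequences : List (String × String)), Dom_motif_score sequences → Pre_motif_score sequences → Spec_motif_score sequences (motif_score sequences)

-- ===== LEMMAS AND PROOFS =====

-- the column of characters at position j, and the flat (position, char) key list B counts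
def pvCol (ps : List (String × String)) (j : Nat) : List Char :=
  ps.map (fun p => p.2.toList.getD j ' ')
def pvKey (L : Int) (p : String × String) : List (Int × Char) :=
  (PySem.List.pyRange 0 L 1).map (fun i => (i, p.2.toList.getD i.toNat ' '))
def pvFlat (ps : List (String × String)) (L : Int) : List (Int × Char) :=
  ps.flatMap (pvKey L)
-- the most popular nucleotide's count in column j (0 on an empty column)
def pvM (ps : List (String × String)) (j : Nat) : Int :=
  (PySem.List.max? (PySem.Dict.counter (pvCol ps j)).values (fun v => v)).getD 0

-- insertBy preserves Pairwise for a transitive relation decided by `before`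
theorem pv_insertBy_pairwise {α : Type} (R : α → α → Prop) (before : α → α → Bool)
    (htrans : ∀ a b c, R a b → R b c → R a c)
    (h : ∀ a b, (before a b = true → R a b) ∧ (before a b = false → R b a))
    (x : α) : ∀ (l : List α), l.Pairwise R → (PySem.List.insertBy before x l).Pairwise R := by
  intro l
  induction l with
  | nil => intro _; simp [PySem.List.insertBy]
  | cons y ys ih =>
    intro hp
    rw [List.pairwise_cons] at hp
    obtain ⟨hy, hys⟩ := hp
    by_cases hb : before x y = true
    · simp only [PySem.List.insertBy, hb, if_true]
      refine List.Pairwise.cons ?_ (List.Pairwise.cons hy hys)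
      intro z hz
      rcases List.mem_cons.mp hz with rfl | hz
      · exact (h x z).1 hb
      · exact htrans x y z ((h x y).1 hb) (hy z hz)
    · simp only [PySem.List.insertBy, hb]
      refine List.Pairwise.cons ?_ (ih hys)
      intro z hz
      rcases (PySem.List.mem_insertBy before x z ys).mp hz with rfl | hz
      · exact (h z y).2 (by simpa using hb)
      · exact hy z hz

theorem pv_sorted2_pairwise_fst {α : Type} (xs : List α) (k1 : α → Int) (k2 : α → Char) :
    (PySem.List.sorted2 xs k1 k2 false).Pairwise (fun a b => k1 a ≤ k1 b) := by
  have key : ∀ (l : List α) (acc : List α),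
      acc.Pairwise (fun a b => k1 a ≤ k1 b) →
      (l.foldl (fun acc x => PySem.List.insertBy
        (fun a b => decide (k1 a < k1 b) || !decide (k1 b < k1 a) && decide (k2 a < k2 b)) x acc) acc).Pairwise
        (fun a b => k1 a ≤ k1 b) := by
    intro l
    induction l with
    | nil => intro acc h; simpa using h
    | cons x t ih =>
      intro acc h
      simp only [List.foldl_cons]
      apply ih
      apply pv_insertBy_pairwise
      · intro a b c hab hbc; exact le_trans hab hbc
      · intro a b
        constructor
        · intro hb
          simp only [Bool.or_eq_true, Bool.and_eq_true, Bool.not_eq_true', decide_eq_true_eq,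
            decide_eq_false_iff_not] at hb
          rcases hb with hb | ⟨hb, _⟩
          · exact le_of_lt hb
          · exact le_of_not_gt hb
        · intro hb
          simp only [Bool.or_eq_false_iff, Bool.and_eq_false_iff, Bool.not_eq_false',
            decide_eq_false_iff_not, decide_eq_true_eq] at hb
          exact le_of_not_gt hb.1
      · exact h
  simpa [PySem.List.sorted2] using key xs [] (by simp)

theorem pv_pairwise_le_getLast {α : Type} (k : α → Int) :
    ∀ (l : List α) (h : l ≠ []), l.Pairwise (fun a b => k a ≤ k b) →
      ∀ x ∈ l, k x ≤ k (l.getLast h) := by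
  intro l
  induction l with
  | nil => intro h; exact absurd rfl h
  | cons a t ih =>
    intro _ hp x hx
    rw [List.pairwise_cons] at hp
    cases t with
    | nil => simp at hx; subst hx; simp
    | cons b s =>
      rw [List.getLast_cons (by simp)]
      rcases List.mem_cons.mp hx with rfl | hx
      · exact hp.1 _ (List.getLast_mem _)
      · exact ih (by simp) hp.2 x hx

-- the counter's values are the counts of the distinct elements
theorem pv_counter_values (cs : List Char) :
    (PySem.Dict.counter cs).values
      = (PySem.Set.ofList cs).map (fun k => (cs.count k : Int)) := by
  show (PySem.Dict.counter cs).items.map Prod.snd = _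
  rw [PySem.Dict.items_counter]
  simp [List.map_map, Function.comp]

-- sum of the counter's values = length of the counted list
theorem pv_counter_values_sum (cs : List Char) :
    ((PySem.Dict.counter cs).values.map (fun v => v)).sum = (cs.length : Int) := by
  have hperm : (PySem.Set.ofList cs).Perm cs.dedup := by
    rw [List.perm_ext_iff_of_nodup (PySem.Set.nodup_ofList cs) cs.nodup_dedup]
    intro a; simp [PySem.Set.mem_ofList, List.mem_dedup]
  rw [pv_counter_values, List.map_id']
  calc ((PySem.Set.ofList cs).map (fun k => (cs.count k : Int))).sum
      = ((cs.dedup).map (fun k => (cs.count k : Int))).sum :=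
        (hperm.map (fun k => (cs.count k : Int))).sum_eq
    _ = (((cs.dedup).map (fun k => cs.count k)).sum : Int) := by
        rw [Nat.cast_list_sum, List.map_map]; rfl
    _ = (cs.length : Int) := by rw [List.sum_map_count_dedup_eq_length]

-- the counter of a nonempty column always has a maximal value
theorem pv_max_some (ps : List (String × String)) (hne : ps ≠ []) (j : Nat) :
    ∃ m, PySem.List.max? (PySem.Dict.counter (pvCol ps j)).values (fun v => v) = some m := by
  cases hm : PySem.List.max? (PySem.Dict.counter (pvCol ps j)).values (fun v => v) with
  | some m => exact ⟨m, rfl⟩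
  | none =>
    exfalso
    have hval := (PySem.List.max?_eq_none_iff _ _).mp hm
    rw [pv_counter_values] at hval
    simp only [List.map_eq_nil_iff] at hval
    obtain ⟨p, hp⟩ := List.exists_mem_of_ne_nil ps hne
    have : p.2.toList.getD j ' ' ∈ PySem.Set.ofList (pvCol ps j) := by
      rw [PySem.Set.mem_ofList, pvCol]
      exact List.mem_map_of_mem hp
    rw [hval] at this
    simp at this

-- A's per-column score: sorted tuples, all counts but the last = total - max
theorem pv_colA (cs : List Char) (m : Int)
    (hmm : m ∈ (PySem.Dict.counter cs).values)
    (hmax : ∀ y ∈ (PySem.Dict.counter cs).values, y ≤ m) :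
    (PySem.List.slice (PySem.List.sorted2
        ((PySem.Dict.counter cs).items.map (fun bc => (bc.2, bc.1)))
        (fun p => p.1) (fun p => p.2) false) none (some (-1))).foldl
      (fun acc b => acc + b.1) 0 = (cs.length : Int) - m := by
  set pop := (PySem.Dict.counter cs).items.map (fun bc : Char × Int => (bc.2, bc.1)) with hpop
  set pops := PySem.List.sorted2 pop (fun p => p.1) (fun p => p.2) false with hpops
  have hperm : pops.Perm pop := PySem.List.sorted2_perm pop _ _ false
  have hfst : pop.map Prod.fst = (PySem.Dict.counter cs).values := by
    rw [hpop, List.map_map]; rfl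
  have hppairs : pops.Pairwise (fun a b => a.1 ≤ b.1) := pv_sorted2_pairwise_fst pop _ _
  have hpopne : pop ≠ [] := by
    intro h0
    rw [← hfst, h0] at hmm; simp at hmm
  have hpopsne : pops ≠ [] := by
    intro h0
    exact hpopne (List.eq_nil_of_length_eq_zero (by rw [← hperm.length_eq, h0]; rfl))
  have hlastmem : pops.getLast hpopsne ∈ pop := hperm.mem_iff.mp (List.getLast_mem hpopsne)
  have hlast1 : (pops.getLast hpopsne).1 = m := by
    apply le_antisymm
    · exact hmax _ (by rw [← hfst]; exact List.mem_map_of_mem hlastmem)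
    · rw [← hfst] at hmm
      obtain ⟨q, hq, hq1⟩ := List.mem_map.mp hmm
      rw [← hq1]
      exact pv_pairwise_le_getLast _ pops hpopsne hppairs q (hperm.mem_iff.mpr hq)
  have hsum : (pops.map Prod.fst).sum = (cs.length : Int) := by
    rw [(hperm.map Prod.fst).sum_eq, hfst]
    simpa [List.map_id'] using pv_counter_values_sum cs
  rw [PySem.List.slice_to_neg_one, PySem.List.foldl_add]
  have hsplit := List.dropLast_append_getLast hpopsne
  have : (pops.map Prod.fst).sum
      = (pops.dropLast.map Prod.fst).sum + (pops.getLast hpopsne).1 := by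
    conv_lhs => rw [← hsplit]
    simp
  rw [hsum, hlast1] at this
  omega

-- A's key-loop with dict lookups = the loop over the pairs themselves
theorem pv_keys_fold (ps : List (String × String)) (d : PySem.Dict String String)
    (h : ∀ p ∈ ps, d.get? p.1 = some p.2)
    (F : PySem.Dict Char Int → String → PySem.Dict Char Int) (init : PySem.Dict Char Int) :
    (ps.map Prod.fst).foldl (fun nuc seq =>
        match d.get? seq with
        | none => nuc
        | some sv => F nuc sv) init
      = ps.foldl (fun nuc p => F nuc p.2) init := by
  rw [List.foldl_map]
  apply PySem.List.foldl_congr_mem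
  intro acc p hp
  rw [h p hp]

theorem pv_foldA_counter (ps : List (String × String)) (j : Nat)
    (h2 : ∀ p ∈ ps, PySem.Str.pyGet? p.2 (j : Int) = some (p.2.toList.getD j ' ')) :
    ps.foldl (fun nuc p =>
        match PySem.Str.pyGet? p.2 (j : Int) with
        | none => nuc
        | some c =>
          match nuc.get? c with
          | some cnt => nuc.insert c (cnt + 1)
          | none => nuc.insert c 1) (PySem.Dict.empty : PySem.Dict Char Int)
      = PySem.Dict.counter (pvCol ps j) := by
  rw [PySem.List.foldl_congr_mem ps _
    (fun nuc p => nuc.insert (p.2.toList.getD j ' ') (nuc.getD (p.2.toList.getD j ' ') 0 + 1)) _ ?_]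
  · have h3 := PySem.Dict.foldl_insert_getD_add_one_eq_counter (pvCol ps j)
    rw [pvCol, List.foldl_map] at h3
    exact h3
  · intro acc p hp
    rw [h2 p hp]
    simp only [List.getD]
    cases hc : acc.get? (p.2.toList[j]?.getD ' ') with
    | none => simp [hc, PySem.Dict.getD_eq_get?_getD]
    | some cnt => simp [hc, PySem.Dict.getD_eq_get?_getD]

-- countP of a predicate that can only hold at one designated element of a Nodup list
theorem pv_countP_unique {α : Type} [DecidableEq α] (q : α → Bool) (j : α)
    (hq : ∀ x, q x = true → x = j) :
    ∀ l : List α, l.Nodup → l.countP q = if j ∈ l ∧ q j = true then 1 else 0 := by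
  intro l
  induction l with
  | nil => intro _; simp
  | cons a t ih =>
    intro hnd
    rw [List.nodup_cons] at hnd
    obtain ⟨ha, ht⟩ := hnd
    rw [List.countP_cons, ih ht]
    cases hqa : q a with
    | true =>
      have haj : a = j := hq a hqa
      subst haj
      simp [ha, hqa]
    | false =>
      by_cases hja : j = a
      · subst hja
        simp [hqa]
      · simp [hja]

-- how often a (position, char) key occurs in one sequence's key list
theorem pv_count_pvKey (p : String × String) (L : Int) (j : Nat) (ch : Char)
    (hj : (j : Int) < L) :
    (pvKey L p).count ((j : Int), ch)
      = (if p.2.toList.getD j ' ' = ch then 1 else 0) := by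
  rw [pvKey, List.count_eq_countP', List.countP_map]
  rw [pv_countP_unique _ ((j : Int))
    (by
      intro x hx
      simp only [Function.comp_apply, beq_iff_eq, Prod.mk.injEq] at hx
      exact hx.1)
    _ (PySem.List.nodup_pyRange_one 0 L)]
  have hjm : (j : Int) ∈ PySem.List.pyRange 0 L 1 := by
    rw [PySem.List.mem_pyRange_one]; omega
  simp [hjm, Function.comp, Prod.ext_iff]

-- count distributes over flatMap
theorem pv_count_flatMap (l : List (String × String)) (g : (String × String) → List (Int × Char))
    (x : Int × Char) :
    (l.flatMap g).count x = (l.map (fun p => (g p).count x)).sum := by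
  induction l with
  | nil => simp
  | cons a t ih => simp [List.count_append, ih]

-- a 0/1 sum over a list is a countP
theorem pv_sum_ite_count {α : Type} (l : List α) (P : α → Prop) [DecidablePred P] :
    (l.map (fun x => if P x then 1 else 0)).sum = l.countP (fun x => decide (P x)) := by
  induction l with
  | nil => simp
  | cons a t ih =>
    rw [List.map_cons, List.sum_cons, ih, List.countP_cons]
    by_cases h : P a <;> simp [h] <;> omega

-- count of a key in the flat list = count of the char in the column
theorem pv_count_flat (ps : List (String × String)) (L : Int) (j : Nat) (ch : Char)
    (hj : (j : Int) < L) :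
    (pvFlat ps L).count ((j : Int), ch) = (pvCol ps j).count ch := by
  rw [pvFlat, pv_count_flatMap]
  rw [List.map_congr_left (fun p _ => pv_count_pvKey p L j ch hj)]
  rw [pv_sum_ite_count ps (fun p => p.2.toList.getD j ' ' = ch)]
  rw [pvCol, List.count_eq_countP', List.countP_map]
  apply List.countP_congr
  intro p _
  simp [Function.comp]

-- membership of a key in the flat list
theorem pv_mem_flat (ps : List (String × String)) (L : Int) (j : Nat) (ch : Char)
    (hj : (j : Int) < L) :
    (((j : Int), ch) ∈ pvFlat ps L ↔ ch ∈ pvCol ps j) := by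
  constructor
  · intro h
    obtain ⟨p, hp, hk⟩ := List.mem_flatMap.mp h
    obtain ⟨i, _, he⟩ := List.mem_map.mp hk
    rw [Prod.mk.injEq] at he
    obtain ⟨h1, h2⟩ := he
    subst h1
    rw [pvCol]
    apply List.mem_map.mpr
    refine ⟨p, hp, ?_⟩
    simpa using h2
  · intro h
    obtain ⟨p, hp, he⟩ := List.mem_map.mp h
    apply List.mem_flatMap.mpr
    refine ⟨p, hp, ?_⟩
    apply List.mem_map.mpr
    refine ⟨(j : Int), ?_, ?_⟩
    · rw [PySem.List.mem_pyRange_one]; omega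
    · rw [Prod.mk.injEq]
      exact ⟨rfl, by simpa using he⟩

-- a foldl of max lands on the start value or an element
theorem pv_foldl_max_mem : ∀ (l : List Int) (a : Int), l.foldl max a = a ∨ l.foldl max a ∈ l := by
  intro l
  induction l with
  | nil => intro a; left; rfl
  | cons x t ih =>
    intro a
    rcases ih (max a x) with h | h
    · rcases le_or_gt x a with hx | hx
      · left; rw [List.foldl_cons, h]; omega
      · right; rw [List.foldl_cons, h]; simp; left; omega
    · right; exact List.mem_cons_of_mem _ h

-- B's maxima loop, characterised per index
theorem pv_maxfold (I : List ((Int × Char) × Int)) :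
    ∀ (m : List Int), (∀ kv ∈ I, 0 ≤ kv.1.1 ∧ kv.1.1 < (m.length : Int)) →
    (I.foldl (fun m kv =>
        match PySem.List.pyGet? m kv.1.1 with
        | none => m
        | some cur => if kv.2 > cur then PySem.List.pySetD m kv.1.1 kv.2 else m) m).length
      = m.length ∧
    ∀ j : Nat, j < m.length →
      (I.foldl (fun m kv =>
        match PySem.List.pyGet? m kv.1.1 with
        | none => m
        | some cur => if kv.2 > cur then PySem.List.pySetD m kv.1.1 kv.2 else m) m).getD j 0
        = ((I.filter (fun kv => kv.1.1 == (j : Int))).map (fun kv => kv.2)).foldl max (m.getD j 0) := by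
  induction I with
  | nil =>
    intro m _
    exact ⟨rfl, fun j _ => by simp⟩
  | cons kv t ih =>
    intro m hm
    have hkv := hm kv List.mem_cons_self
    have ht : ∀ kv' ∈ t, 0 ≤ kv'.1.1 ∧ kv'.1.1 < (m.length : Int) :=
      fun kv' h => hm kv' (List.mem_cons_of_mem _ h)
    have hidx : kv.1.1 = ((kv.1.1.toNat : Nat) : Int) := by omega
    have hi : kv.1.1.toNat < m.length := by omega
    have hget : PySem.List.pyGet? m kv.1.1 = some (m[kv.1.1.toNat]) := by
      conv_lhs => rw [hidx]
      rw [PySem.List.pyGet?_natCast, List.getElem?_eq_getElem hi]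
    have hset : PySem.List.pySetD m kv.1.1 kv.2 = m.set kv.1.1.toNat kv.2 := by
      conv_lhs => rw [hidx]
      rw [PySem.List.pySetD_natCast]
    simp only [List.foldl_cons, hget, hset]
    have hm' : ∀ (m' : List Int), m'.length = m.length →
        (∀ kv' ∈ t, 0 ≤ kv'.1.1 ∧ kv'.1.1 < (m'.length : Int)) := by
      intro m' hl kv' h
      rw [hl]; exact ht kv' h
    by_cases hc : kv.2 > m[kv.1.1.toNat]
    · rw [if_pos hc]
      have hlenset : (m.set kv.1.1.toNat kv.2).length = m.length := List.length_set
      obtain ⟨ihl, ihv⟩ := ih (m.set kv.1.1.toNat kv.2) (hm' _ hlenset)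
      refine ⟨by rw [ihl, hlenset], ?_⟩
      intro j hj
      rw [ihv j (by rw [hlenset]; exact hj)]
      by_cases hij : kv.1.1.toNat = j
      · subst hij
        rw [List.filter_cons_of_pos (by rw [hidx]; exact beq_iff_eq.mpr rfl),
          List.map_cons, List.foldl_cons]
        congr 1
        have hgj : m.getD kv.1.1.toNat 0 = m[kv.1.1.toNat] := List.getD_eq_getElem m 0 hi
        have hset2 : (m.set kv.1.1.toNat kv.2).getD kv.1.1.toNat 0 = kv.2 := by
          simp [List.getD, hi]
        rw [hset2, hgj]
        omega
      · rw [List.filter_cons_of_neg (by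
          rw [hidx]
          simp only [beq_iff_eq, Int.natCast_inj]
          exact hij)]
        congr 1
        simp [List.getD, List.getElem?_set_ne hij]
    · rw [if_neg hc]
      obtain ⟨ihl, ihv⟩ := ih m ht
      refine ⟨ihl, ?_⟩
      intro j hj
      rw [ihv j hj]
      by_cases hij : kv.1.1.toNat = j
      · subst hij
        rw [List.filter_cons_of_pos (by rw [hidx]; exact beq_iff_eq.mpr rfl),
          List.map_cons, List.foldl_cons]
        congr 1
        have hgj : m.getD kv.1.1.toNat 0 = m[kv.1.1.toNat] := List.getD_eq_getElem m 0 hi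
        rw [hgj]
        omega
      · rw [List.filter_cons_of_neg (by
          rw [hidx]
          simp only [beq_iff_eq, Int.natCast_inj]
          exact hij)]

-- the per-column maximum B's maxima loop computes = A's most-popular count
theorem pv_M_flat (ps : List (String × String)) (hne : ps ≠ []) (L : Int) (j : Nat)
    (hj : (j : Int) < L) :
    ((((PySem.Dict.counter (pvFlat ps L)).items.filter
        (fun kv => kv.1.1 == (j : Int))).map (fun kv => kv.2)).foldl max 0) = pvM ps j := by
  obtain ⟨m, hm⟩ := pv_max_some ps hne j
  have hmem := PySem.List.max?_mem hm
  have hub := PySem.List.max?_isMax hm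
  set valsB := (((PySem.Dict.counter (pvFlat ps L)).items.filter
      (fun kv => kv.1.1 == (j : Int))).map (fun kv => kv.2)) with hvalsB
  -- every value in valsB is a value of the column counter
  have hsub : ∀ v ∈ valsB, v ∈ (PySem.Dict.counter (pvCol ps j)).values := by
    intro v hv
    rw [hvalsB] at hv
    obtain ⟨kv, hkvf, rfl⟩ := List.mem_map.mp hv
    obtain ⟨hkvi, hkvp⟩ := List.mem_filter.mp hkvf
    rw [PySem.Dict.items_counter] at hkvi
    obtain ⟨k, hk, rfl⟩ := List.mem_map.mp hkvi
    simp only [beq_iff_eq] at hkvp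
    have hkeq : ((j : Int), k.2) = k := by rw [← hkvp]
    have hkflat : ((j : Int), k.2) ∈ pvFlat ps L := by
      rw [hkeq]; exact (PySem.Set.mem_ofList _ _).mp hk
    have hch : k.2 ∈ pvCol ps j := (pv_mem_flat ps L j k.2 hj).mp hkflat
    have hcount : (pvFlat ps L).count k = (pvCol ps j).count k.2 := by
      rw [← hkeq]; exact pv_count_flat ps L j k.2 hj
    rw [pv_counter_values]
    apply List.mem_map.mpr
    refine ⟨k.2, (PySem.Set.mem_ofList _ _).mpr hch, ?_⟩
    show ((pvCol ps j).count k.2 : Int) = ((pvFlat ps L).count k : Int)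
    rw [hcount]
  -- the column maximum itself is a value in valsB
  have hmB : m ∈ valsB := by
    rw [pv_counter_values] at hmem
    obtain ⟨ch, hchS, rfl⟩ := List.mem_map.mp hmem
    have hch : ch ∈ pvCol ps j := (PySem.Set.mem_ofList _ _).mp hchS
    have hkflat : ((j : Int), ch) ∈ pvFlat ps L := (pv_mem_flat ps L j ch hj).mpr hch
    rw [hvalsB]
    apply List.mem_map.mpr
    refine ⟨(((j : Int), ch), ((pvFlat ps L).count ((j : Int), ch) : Int)), ?_, ?_⟩
    · apply List.mem_filter.mpr
      constructor
      · rw [PySem.Dict.items_counter]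
        exact List.mem_map.mpr ⟨((j : Int), ch), (PySem.Set.mem_ofList _ _).mpr hkflat, rfl⟩
      · exact beq_iff_eq.mpr rfl
    · show ((pvFlat ps L).count ((j : Int), ch) : Int) = ((pvCol ps j).count ch : Int)
      rw [pv_count_flat ps L j ch hj]
  have hmpos : 0 < m := by
    rw [pv_counter_values] at hmem
    obtain ⟨ch, hchS, rfl⟩ := List.mem_map.mp hmem
    have hch : ch ∈ pvCol ps j := (PySem.Set.mem_ofList _ _).mp hchS
    exact_mod_cast List.count_pos_iff.mpr hch
  have hle := PySem.List.le_foldl_max valsB 0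
  have hmr : m ≤ valsB.foldl max 0 := hle.2 m hmB
  rcases pv_foldl_max_mem valsB 0 with h0 | hmem2
  · exfalso; rw [h0] at hmr; omega
  · have hrm : valsB.foldl max 0 ≤ m := hub _ (hsub _ hmem2)
    have : valsB.foldl max 0 = m := le_antisymm hrm hmr
    rw [this, pvM, hm]
    rfl

-- closed-form sum of (n - f k)
theorem pv_sum_sub {α : Type} (l : List α) (n : Int) (f : α → Int) :
    (l.map (fun k => n - f k)).sum = n * l.length - (l.map f).sum := by
  induction l with
  | nil => simp
  | cons a t ih => simp [ih]; ring

-- ===== VERDICT (by name: the statement is the Claim_ definition above) =====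
theorem motif_score_spec : Claim_equal_motif_score := by
  intro sequences hdom hpre
  obtain ⟨hne, hnd, hlen⟩ := hpre
  cases sequences with
  | nil => exact absurd rfl hne
  | cons p0 rest =>
  obtain ⟨k0, v0⟩ := p0
  have hndk : (PySem.Dict.mk ((k0, v0) :: rest)).keys.Nodup := by
    rw [PySem.Dict.keys_mk]; exact hnd
  have hget : ∀ p ∈ (k0, v0) :: rest,
      (PySem.Dict.mk ((k0, v0) :: rest)).get? p.1 = some p.2 := by
    intro p hp
    exact PySem.Dict.get?_of_mem_items _ (by exact hp) hndk
  have hlv : PySem.Str.len v0 = (v0.toList.length : Int) := by simp [PySem.Str.len]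
  have hL0 : 0 ≤ PySem.Str.len v0 := by rw [hlv]; exact Int.natCast_nonneg _
  have h2 : ∀ p ∈ (k0, v0) :: rest, ∀ j : Nat, (j : Int) < PySem.Str.len v0 →
      PySem.Str.pyGet? p.2 ((j : Nat) : Int) = some (p.2.toList.getD j ' ') := by
    intro p hp j hjL
    have hl := hlen p hp
    have hlp : PySem.Str.len p.2 = (p.2.toList.length : Int) := by simp [PySem.Str.len]
    have hjlt : j < p.2.toList.length := by
      simp only [List.headI] at hl; omega
    rw [PySem.Str.pyGet?_natCast, List.getElem?_eq_getElem hjlt, List.getD_eq_getElem _ _ hjlt]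
  show motif_score _ = motif_score_alt _
  -- A's value: the per-column closed form, summed
  have hA : motif_score ((k0, v0) :: rest)
      = ((PySem.List.pyRange 0 (PySem.Str.len v0) 1).map
          (fun i => ((((k0, v0) :: rest).length : Nat) : Int) - pvM ((k0, v0) :: rest) i.toNat)).sum := by
    unfold motif_score
    simp only [PySem.Dict.keys_mk, List.map_cons]
    rw [show PySem.List.pyGet? (k0 :: rest.map Prod.fst) 0 = some k0 by
          simp [PySem.List.pyGet?, PySem.List.pyIdx?]]
    dsimp only
    rw [show (PySem.Dict.mk ((k0, v0) :: rest)).get? k0 = some v0 by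
          simpa using hget (k0, v0) (by simp)]
    dsimp only
    rw [show ((PySem.List.pyRange 0 (PySem.Str.len v0) 1).map
          (fun i => ((((k0, v0) :: rest).length : Nat) : Int) - pvM ((k0, v0) :: rest) i.toNat)).sum
        = (PySem.List.pyRange 0 (PySem.Str.len v0) 1).foldl
          (fun score i => score + (((((k0, v0) :: rest).length : Nat) : Int) - pvM ((k0, v0) :: rest) i.toNat)) 0 by
        rw [PySem.List.foldl_add, zero_add]]
    apply PySem.List.foldl_congr_mem
    intro acc i hi
    rw [PySem.List.mem_pyRange_one] at hi
    have hij : i = ((i.toNat : Nat) : Int) := by omega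
    rw [hij]
    rw [show (k0 :: List.map (fun x : String × String => x.1) rest)
          = ((k0, v0) :: rest).map Prod.fst from rfl]
    rw [pv_keys_fold _ _ hget]
    rw [pv_foldA_counter _ i.toNat (fun p hp => h2 p hp i.toNat (by omega))]
    obtain ⟨m, hm⟩ := pv_max_some ((k0, v0) :: rest) (by simp) i.toNat
    rw [pv_colA _ m (PySem.List.max?_mem hm) (fun y hy => PySem.List.max?_isMax hm y hy)]
    have hpv : pvM ((k0, v0) :: rest) ((i.toNat : Int)).toNat = m := by
      rw [show ((i.toNat : Int)).toNat = i.toNat by omega, pvM, hm]; rfl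
    rw [hpv]
    simp [pvCol]
  -- B's value: the flat counter, the maxima array and the closed form
  have hB : motif_score_alt ((k0, v0) :: rest)
      = ((((k0, v0) :: rest).length : Nat) : Int) * PySem.Str.len v0
        - ((List.range (PySem.Str.len v0).toNat).map (fun j => pvM ((k0, v0) :: rest) j)).sum := by
    unfold motif_score_alt
    simp only [PySem.Dict.values_mk, List.map_cons]
    rw [show PySem.List.pyGet? (v0 :: rest.map Prod.snd) 0 = some v0 by
          simp [PySem.List.pyGet?, PySem.List.pyIdx?]]
    dsimp only
    have hcounts : (v0 :: List.map (fun x : String × String => x.2) rest).foldl (fun d s =>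
          (PySem.List.pyRange 0 (PySem.Str.len v0) 1).foldl (fun d i =>
            match PySem.Str.pyGet? s i with
            | none => d
            | some ch => d.insert (i, ch) (d.getD (i, ch) 0 + 1)) d)
          (PySem.Dict.empty : PySem.Dict (Int × Char) Int)
        = PySem.Dict.counter (pvFlat ((k0, v0) :: rest) (PySem.Str.len v0)) := by
      rw [show (v0 :: List.map (fun x : String × String => x.2) rest)
            = ((k0, v0) :: rest).map Prod.snd from rfl]
      rw [List.foldl_map]
      have hstep : ((k0, v0) :: rest).foldl (fun d p =>
            (PySem.List.pyRange 0 (PySem.Str.len v0) 1).foldl (fun d i =>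
              match PySem.Str.pyGet? p.2 i with
              | none => d
              | some ch => d.insert (i, ch) (d.getD (i, ch) 0 + 1)) d)
            (PySem.Dict.empty : PySem.Dict (Int × Char) Int)
          = ((k0, v0) :: rest).foldl (fun d p =>
              (pvKey (PySem.Str.len v0) p).foldl (fun d x => d.insert x (d.getD x 0 + 1)) d)
              (PySem.Dict.empty : PySem.Dict (Int × Char) Int) := by
        apply PySem.List.foldl_congr_mem
        intro d p hp
        rw [pvKey, List.foldl_map]
        apply PySem.List.foldl_congr_mem
        intro acc i hi
        rw [PySem.List.mem_pyRange_one] at hi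
        have hij : i = ((i.toNat : Nat) : Int) := by omega
        rw [hij]
        rw [h2 p hp i.toNat (by omega), Int.toNat_natCast]
      rw [hstep, ← List.foldl_flatMap]
      exact PySem.Dict.foldl_insert_getD_add_one_eq_counter _
    rw [hcounts]
    have hbound : ∀ kv ∈ (PySem.Dict.counter (pvFlat ((k0, v0) :: rest) (PySem.Str.len v0))).items,
        0 ≤ kv.1.1 ∧ kv.1.1 < ((List.replicate (PySem.Str.len v0).toNat (0 : Int)).length : Int) := by
      intro kv hkv
      rw [PySem.Dict.items_counter] at hkv
      obtain ⟨k, hk, rfl⟩ := List.mem_map.mp hkv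
      have hkflat : k ∈ pvFlat ((k0, v0) :: rest) (PySem.Str.len v0) :=
        (PySem.Set.mem_ofList _ _).mp hk
      obtain ⟨p, _, hkey⟩ := List.mem_flatMap.mp hkflat
      obtain ⟨i, hi, rfl⟩ := List.mem_map.mp hkey
      rw [PySem.List.mem_pyRange_one] at hi
      simp only [List.length_replicate]
      constructor
      · exact hi.1
      · have hcast : (((PySem.Str.len v0).toNat : Nat) : Int) = PySem.Str.len v0 := by omega
        rw [hcast]; exact hi.2
    obtain ⟨hlenM, hvalM⟩ := pv_maxfold _ (List.replicate (PySem.Str.len v0).toNat 0) hbound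
    have hmaxima : ((PySem.Dict.counter (pvFlat ((k0, v0) :: rest) (PySem.Str.len v0))).items.foldl
          (fun m kv => match PySem.List.pyGet? m kv.1.1 with
            | none => m
            | some cur => if kv.2 > cur then PySem.List.pySetD m kv.1.1 kv.2 else m)
          (List.replicate (PySem.Str.len v0).toNat 0))
        = (List.range (PySem.Str.len v0).toNat).map (fun j => pvM ((k0, v0) :: rest) j) := by
      apply List.ext_getElem
      · rw [hlenM]; simp
      · intro j h1 h2'
        have hjN : j < (PySem.Str.len v0).toNat := by simpa using h2'
        have hjI : (j : Int) < PySem.Str.len v0 := by omega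
        have hv := hvalM j (by simpa using hjN)
        rw [List.getD_eq_getElem _ 0 h1] at hv
        rw [hv]
        have hrep : (List.replicate (PySem.Str.len v0).toNat (0 : Int)).getD j 0 = 0 := by
          simp [List.getD]
        rw [hrep]
        rw [pv_M_flat ((k0, v0) :: rest) (by simp) (PySem.Str.len v0) j hjI]
        simp
    rw [hmaxima]
    simp
  rw [hA, hB]
  rw [PySem.List.pyRange_one]
  rw [List.map_map]
  rw [List.map_congr_left (fun (k : Nat) _ => by
    simp : ∀ (k : Nat), k ∈ List.range ((PySem.Str.len v0) - 0).toNat →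
      ((fun i : Int => ((((k0, v0) :: rest).length : Nat) : Int) - pvM ((k0, v0) :: rest) i.toNat) ∘
        (fun k : Nat => (0 : Int) + (k : Int))) k
        = ((((k0, v0) :: rest).length : Nat) : Int) - pvM ((k0, v0) :: rest) k)]
  rw [pv_sum_sub]
  rw [List.length_range]
  have hcast : ((((PySem.Str.len v0) - 0).toNat : Nat) : Int) = PySem.Str.len v0 := by omega
  rw [hcast]
  rw [show ((PySem.Str.len v0) - 0).toNat = (PySem.Str.len v0).toNat by omega]
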